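-- pv_equiv track=rewrite | github.com/thiagopelizoni/ProjectEuler | src/problem_296.py | count_for_a
-- ===== SOURCE A (Python) =====
-- import math
--
-- def count_for_a(a: int, N: int) -> int:
--     total = 0
--     max_b = (N - a) // 2
--     for b in range(a, max_b + 1):
--         g = math.gcd(a, b)
--         ab_sum = a + b
--         e = ab_sum // g
--         min_c = b
--         max_c = min(ab_sum - 1, N - ab_sum)
--         if max_c < min_c:
--             continue
--
--         m_min = (min_c + e - 1) // e
--         m_max = max_c // e
--         if m_max >= m_min:
--             total += m_max - m_min + 1
--
--     return total
-- ===== SOURCE B (Python) =====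
-- import math
--
-- def count_for_a(a: int, N: int) -> int:
--     total = 0
--     for b in range(a, (N - a) // 2 + 1):
--         e = (a + b) // math.gcd(a, b)
--         min_c = b
--         max_c = min(a + b - 1, N - a - b)
--         for c in range(min_c, max_c + 1):
--             if c % e == 0:
--                 total += 1
--     return total
-- ===== Notes on version B (the rewrite author's own statement) =====
-- stated objective: alternative
-- what changed: The O(1) closed-form count of multiples of e in [min_c, max_c] (ceil/floor arithmetic with the m_max>=m_min guard) is replaced by a direct enumeration: an inner loop over c in range(min_c, max_c+1) counting c % e == 0, so the guard and the m_min/m_max arithmetic disappear.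
import Mathlib
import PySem

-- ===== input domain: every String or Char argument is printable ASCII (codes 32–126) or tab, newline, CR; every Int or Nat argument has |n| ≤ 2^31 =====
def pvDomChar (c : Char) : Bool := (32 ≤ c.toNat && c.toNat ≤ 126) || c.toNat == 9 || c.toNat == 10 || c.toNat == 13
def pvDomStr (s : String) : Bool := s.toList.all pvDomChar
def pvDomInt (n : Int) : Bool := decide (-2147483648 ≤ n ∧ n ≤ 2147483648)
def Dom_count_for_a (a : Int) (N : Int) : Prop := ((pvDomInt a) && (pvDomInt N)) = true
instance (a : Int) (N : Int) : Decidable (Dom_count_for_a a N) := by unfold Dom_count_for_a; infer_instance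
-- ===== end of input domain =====

-- B replaces A's closed-form ceil/floor count of multiples of e by a direct inner
-- loop over the c-range (alternative decomposition, not faster).

-- ===== PORT A =====
def count_for_a (a : Int) (N : Int) : Int :=
  let max_b := PySem.Int.floordiv (N - a) 2
  (PySem.List.pyRange a (max_b + 1) 1).foldl (fun total b =>
    let g : Int := Int.gcd a b
    let ab_sum := a + b
    let e := PySem.Int.floordiv ab_sum g
    let min_c := b
    let max_c := min (ab_sum - 1) (N - ab_sum)
    if max_c < min_c then total
    else
      let m_min := PySem.Int.floordiv (min_c + e - 1) e
      let m_max := PySem.Int.floordiv max_c e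
      if m_max ≥ m_min then total + (m_max - m_min + 1) else total) 0

-- ===== PORT B =====
def count_for_a_alt (a : Int) (N : Int) : Int :=
  (PySem.List.pyRange a (PySem.Int.floordiv (N - a) 2 + 1) 1).foldl (fun total b =>
    let e := PySem.Int.floordiv (a + b) (Int.gcd a b)
    let min_c := b
    let max_c := min (a + b - 1) (N - a - b)
    (PySem.List.pyRange min_c (max_c + 1) 1).foldl
      (fun t c => if PySem.Int.mod c e = 0 then t + 1 else t) total) 0

-- ===== PRECONDITION & SPEC =====
-- Pre_ excludes exactly the inputs where Python A raises ZeroDivisionError: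
-- a = 0 with N ≥ 0 puts b = 0 in the range, where gcd(0,0) = 0 is the divisor.
def Pre_count_for_a (a : Int) (N : Int) : Prop := ¬ (a = 0 ∧ 0 ≤ N)
instance (a : Int) (N : Int) : Decidable (Pre_count_for_a a N) := by unfold Pre_count_for_a; infer_instance
def pvWitness_count_for_a : Int × Int := (3, 40)

def Spec_count_for_a (a : Int) (N : Int) (out : Int) : Prop := out = count_for_a_alt a N
instance (a : Int) (N : Int) (out : Int) : Decidable (Spec_count_for_a a N out) := by unfold Spec_count_for_a; infer_instance

-- ===== CLAIM (what is proved, stated in full; the proofs are below) =====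
def Claim_equal_count_for_a : Prop := ∀ (a : Int) (N : Int), Dom_count_for_a a N → Pre_count_for_a a N → Spec_count_for_a a N (count_for_a a N)

-- ===== LEMMAS AND PROOFS =====

-- one fold step over [hi]: the quotient hi/e jumps by 1 exactly at multiples of e
theorem ediv_sub_ediv_pred (hi e : Int) (he : 0 < e) :
    hi / e - (hi - 1) / e = if e ∣ hi then 1 else 0 := by
  have h1 : e * (hi / e) + hi % e = hi := Int.ediv_add_emod hi e
  have hr0 : 0 ≤ hi % e := Int.emod_nonneg hi (ne_of_gt he)
  have hr1 : hi % e < e := Int.emod_lt_of_pos hi he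
  have hdvd : e ∣ hi ↔ hi % e = 0 := Int.dvd_iff_emod_eq_zero
  by_cases hr : hi % e = 0
  · have hpred : (hi - 1) / e = hi / e - 1 := by
      have h2 : hi - 1 = (e - 1) + (hi / e - 1) * e := by nlinarith [h1]
      rw [h2, Int.add_mul_ediv_right _ _ (ne_of_gt he),
          Int.ediv_eq_zero_of_lt (by omega) (by omega)]
      ring
    simp [hdvd, hr, hpred]
  · have hpred : (hi - 1) / e = hi / e := by
      have h2 : hi - 1 = (hi % e - 1) + (hi / e) * e := by nlinarith [h1]
      rw [h2, Int.add_mul_ediv_right _ _ (ne_of_gt he),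
          Int.ediv_eq_zero_of_lt (by omega) (by omega)]
      ring
    simp [hdvd, hr, hpred]

-- counting multiples of e by iterating over pyRange lo (hi+1)
theorem fold_count_multiples (e : Int) (he : 0 < e) :
    ∀ (n : Nat) (lo hi t0 : Int), hi + 1 - lo = (n : Int) →
    (PySem.List.pyRange lo (hi + 1) 1).foldl
      (fun t c => if PySem.Int.mod c e = 0 then t + 1 else t) t0
      = t0 + (hi / e - (lo - 1) / e) := by
  intro n
  induction n with
  | zero =>
    intro lo hi t0 h
    rw [PySem.List.pyRange_one_eq_nil (by omega)]
    have : hi = lo - 1 := by omega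
    simp [this]
  | succ m ih =>
    intro lo hi t0 h
    have hlh : lo ≤ hi := by omega
    rw [PySem.List.pyRange_one_succ_right hlh, List.foldl_append]
    have hprev := ih lo (hi - 1) t0 (by omega)
    rw [show hi - 1 + 1 = hi by ring] at hprev
    rw [hprev]
    have hmod : PySem.Int.mod hi e = 0 ↔ e ∣ hi := PySem.Int.mod_eq_zero_iff_dvd hi e
    have hstep := ediv_sub_ediv_pred hi e he
    by_cases hd : e ∣ hi
    · rw [if_pos hd] at hstep
      simp only [List.foldl_cons, List.foldl_nil, hmod.mpr hd, if_pos]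
      omega
    · rw [if_neg hd] at hstep
      have hm : ¬ (PySem.Int.mod hi e = 0) := fun hc => hd (hmod.mp hc)
      simp only [List.foldl_cons, List.foldl_nil, if_neg hm]
      omega

-- ceiling via floor: (lo + e - 1) / e = (lo - 1) / e + 1 for e > 0
theorem ceil_shift (lo e : Int) (he : 0 < e) :
    (lo + e - 1) / e = (lo - 1) / e + 1 := by
  have : lo + e - 1 = (lo - 1) + 1 * e := by ring
  rw [this, Int.add_mul_ediv_right _ _ (ne_of_gt he)]

-- ===== VERDICT (by name: the statement is the Claim_ definition above) =====
theorem count_for_a_spec : Claim_equal_count_for_a := by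
  intro a N _ hpre
  unfold Spec_count_for_a count_for_a count_for_a_alt
  dsimp only
  apply PySem.List.foldl_congr_mem'
  intro b hb total
  have hab : a ≤ b := ((PySem.List.mem_pyRange_one).1 hb).1
  by_cases hskip : min (a + b - 1) (N - (a + b)) < b
  · rw [if_pos hskip, PySem.List.pyRange_one_eq_nil (by omega)]
    rfl
  · rw [if_neg hskip, show N - a - b = N - (a + b) from by ring]
    push Not at hskip
    set max_c := min (a + b - 1) (N - (a + b)) with hmc
    have hbmc : b ≤ max_c := hskip
    have ha1 : 1 ≤ a := by
      have : b ≤ a + b - 1 := le_trans hbmc (min_le_left _ _)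
      omega
    have hg0 : (0:Int) < (Int.gcd a b : Int) := by
      have : Int.gcd a b ≠ 0 := by
        intro hz
        exact absurd (Int.gcd_eq_zero_iff.1 hz).1 (by omega)
      exact_mod_cast Nat.pos_of_ne_zero this
    have hga : (Int.gcd a b : Int) ≤ a := Int.le_of_dvd (by omega) (Int.gcd_dvd_left a b)
    set g : Int := (Int.gcd a b : Int) with hgdef
    have hfd : PySem.Int.floordiv (a + b) g = (a + b) / g :=
      PySem.Int.floordiv_eq_ediv_of_pos hg0
    have he : 0 < (a + b) / g := by
      have h1 : (1:Int) ≤ (a + b) / g := by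
        rw [Int.le_ediv_iff_mul_le hg0]
        omega
      omega
    set e : Int := (a + b) / g with hedef
    have hcount := fold_count_multiples e he (max_c + 1 - b).toNat b max_c total
      (by omega)
    rw [hfd, ← hedef] at *
    rw [hcount]
    have hceil : PySem.Int.floordiv (b + e - 1) e = (b - 1) / e + 1 := by
      rw [PySem.Int.floordiv_eq_ediv_of_pos he]
      exact ceil_shift b e he
    rw [hceil, PySem.Int.floordiv_eq_ediv_of_pos he]
    have hmono : (b - 1) / e ≤ max_c / e := Int.ediv_le_ediv he (by omega)
    by_cases hge : max_c / e ≥ (b - 1) / e + 1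
    · rw [if_pos hge]; ring
    · rw [if_neg hge]; omega
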